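-- pv_equiv track=rewrite | github.com/Stockoh/My-python-code | essai.py | roli
-- ===== SOURCE A (Python) =====
-- def roli(n):
--     C=["r","l","t","m","k","f","s","p","ch","n"]
--     V=["o","i","ou","you","a","ya","é","yé","wi","yo"]
--     f=len(str(n))%3
--     r=0
--     m=""
--     for i in enumerate(str(n)):
--         if f==0:
--             if r==0 or r==2:
--                 m+=C[int(i[1])]
--                 if r==2 and not(int(i[0])==len(str(n))-1):
--                     m+="-"
--                 r+=1
--                 r=r%3
--             else:
--                 m+=V[int(i[1])]
--                 r+=1
--                 r=r%3
--         elif f==2: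
--             if r==0:
--                 m+=C[int(i[1])]
--                 r+=1
--             else:
--                 m+=V[int(i[1])]
--                 if not(int(i[0])==len(str(n))-1):
--                     m+="-"
--                 r=0
--                 f=0
--         else:
--             m+=V[int(i[1])]
--             if not(int(i[0])==len(str(n))-1):
--                 m+="-"
--             r=0
--             f=0
--     return m
-- ===== SOURCE B (Python) =====
-- def roli(n):
--     C = ["r", "l", "t", "m", "k", "f", "s", "p", "ch", "n"]
--     V = ["o", "i", "ou", "you", "a", "ya", "é", "yé", "wi", "yo"]
--
--     def group(g):
--         return C[int(g[0])] + V[int(g[1])] + C[int(g[2])]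
--
--     s = str(n)
--     r = len(s) % 3
--     if r == 1:
--         head = [V[int(s[0])]]
--     elif r == 2:
--         head = [C[int(s[0])] + V[int(s[1])]]
--     else:
--         head = []
--     groups = [s[i:i + 3] for i in range(r, len(s), 3)]
--     return "-".join(head + [group(g) for g in groups])
-- ===== Notes on version B (the rewrite author's own statement) =====
-- stated objective: simpler
-- what changed: Replaced A's single-pass state machine (flags f/r mutated per digit, with in-loop hyphen decisions) by a direct decomposition: carve off the leading remainder chunk of the digit string (vowel, or consonant+vowel), slice the rest into consecutive consonant-vowel-consonant triples, and join all group syllables with '-'.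
import Mathlib
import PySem

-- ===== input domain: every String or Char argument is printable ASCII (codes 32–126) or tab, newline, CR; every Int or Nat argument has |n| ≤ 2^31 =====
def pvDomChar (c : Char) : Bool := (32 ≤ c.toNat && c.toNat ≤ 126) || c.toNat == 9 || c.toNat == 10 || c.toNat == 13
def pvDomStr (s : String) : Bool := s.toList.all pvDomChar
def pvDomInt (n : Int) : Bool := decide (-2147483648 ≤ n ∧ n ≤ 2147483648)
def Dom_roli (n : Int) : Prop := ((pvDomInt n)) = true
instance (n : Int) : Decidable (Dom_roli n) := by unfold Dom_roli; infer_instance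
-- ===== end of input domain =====

-- B re-decomposes A's stateful digit loop into head-chunk + 3-chunks mapped to syllables and joined with '-'; objective: simpler.


-- ===== PORT A =====
def roliC : List (List Char) := [['r'],['l'],['t'],['m'],['k'],['f'],['s'],['p'],['c','h'],['n']]
def roliV : List (List Char) := [['o'],['i'],['o','u'],['y','o','u'],['a'],['y','a'],['é'],['y','é'],['w','i'],['y','o']]
-- int(ch): none (= ValueError, e.g. on the '-' of a negative n) is excluded by Pre_roli; getD 0 is never reached there
def pyDigit (c : Char) : Nat := ((PySem.Int.ofChars? [c]).getD 0).toNat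

def roliStep (len : Nat) (st : Nat × Nat × List Char) (p : Int × Char) : Nat × Nat × List Char :=
  let f := st.1
  let r := st.2.1
  let m := st.2.2
  let d := pyDigit p.2
  if f = 0 then
    if r = 0 ∨ r = 2 then
      let m := m ++ roliC.getD d []
      let m := if r = 2 ∧ ¬ (p.1 = (len : Int) - 1) then m ++ ['-'] else m
      (f, (r + 1) % 3, m)
    else
      (f, (r + 1) % 3, m ++ roliV.getD d [])
  else if f = 2 then
    if r = 0 then
      (f, r + 1, m ++ roliC.getD d [])
    else
      let m := m ++ roliV.getD d []
      let m := if ¬ (p.1 = (len : Int) - 1) then m ++ ['-'] else m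
      (0, 0, m)
  else
    let m := m ++ roliV.getD d []
    let m := if ¬ (p.1 = (len : Int) - 1) then m ++ ['-'] else m
    (0, 0, m)

def roli (n : Int) : String :=
  let s := PySem.Int.toChars n
  let len := s.length
  String.ofList ((PySem.List.enumerate s 0).foldl (roliStep len) (len % 3, 0, [])).2.2

-- ===== PORT B =====
def roliGroup (g : List Char) : List Char :=
  roliC.getD (pyDigit (g.getD 0 ' ')) [] ++ roliV.getD (pyDigit (g.getD 1 ' ')) [] ++ roliC.getD (pyDigit (g.getD 2 ' ')) []

def chunks3 : List Char → List (List Char)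
  | [] => []
  | a :: b :: c :: t => [a, b, c] :: chunks3 t
  | l => [l]

def roli_alt (n : Int) : String :=
  let s := PySem.Int.toChars n
  let r := s.length % 3
  let head : List (List Char) :=
    if r = 1 then [roliV.getD (pyDigit (s.getD 0 ' ')) []]
    else if r = 2 then [roliC.getD (pyDigit (s.getD 0 ' ')) [] ++ roliV.getD (pyDigit (s.getD 1 ' ')) []]
    else []
  String.ofList (List.intercalate ['-'] (head ++ (chunks3 (s.drop r)).map roliGroup))

-- ===== PRECONDITION & SPEC =====
-- Pre_ excludes exactly the negative n, on which Python A (and B) raise ValueError: int('-') on the sign character.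
def Pre_roli (n : Int) : Prop := 0 ≤ n
instance (n : Int) : Decidable (Pre_roli n) := by unfold Pre_roli; infer_instance
def pvWitness_roli : Int := 1234
def Spec_roli (n : Int) (out : String) : Prop := out = roli_alt n
instance (n : Int) (out : String) : Decidable (Spec_roli n out) := by unfold Spec_roli; infer_instance

-- ===== CLAIM (what is proved, stated in full; the proofs are below) =====
def Claim_equal_roli : Prop := ∀ (n : Int), Dom_roli n → Pre_roli n → Spec_roli n (roli n)

-- ===== LEMMAS AND PROOFS =====

theorem intercalate_dash_cons_ne_nil (x : List Char) (l : List (List Char)) (h : l ≠ []) :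
    List.intercalate ['-'] (x :: l) = x ++ ['-'] ++ List.intercalate ['-'] l := by
  cases l with
  | nil => exact absurd rfl h
  | cons y l => simp [List.intercalate, List.intersperse]

theorem chunks3_ne_nil (t : List Char) (h : t ≠ []) : chunks3 t ≠ [] := by
  cases t with
  | nil => exact absurd rfl h
  | cons a l =>
    cases l with
    | nil => simp [chunks3]
    | cons b l2 =>
      cases l2 with
      | nil => simp [chunks3]
      | cons c t' => simp [chunks3]

-- The pure 3-cycle phase of A (state f = 0, r = 0): consuming t (|t| divisible by 3, ending at
-- index len - 1) appends the hyphen-joined CVC groups of t, with no hyphen after the last digit.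
theorem roli_tail_phase (t : List Char) (hlen : t.length % 3 = 0) :
    ∀ (i : Int) (m : List Char) (len : Nat), i + t.length = len →
    (PySem.List.enumerate t i).foldl (roliStep len) (0, 0, m)
      = (0, 0, m ++ List.intercalate ['-'] ((chunks3 t).map roliGroup)) := by
  induction t using chunks3.induct with
  | case1 => intro i m len h; simp [PySem.List.enumerate_nil, chunks3, List.intercalate]
  | case2 a b c t ih =>
    intro i m len h
    have hlen' : t.length % 3 = 0 := by simp at hlen; omega
    rw [PySem.List.enumerate_cons, PySem.List.enumerate_cons, PySem.List.enumerate_cons]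
    simp only [List.foldl_cons]
    by_cases ht : t = []
    · subst ht
      have hi : i + 1 + 1 = (len : Int) - 1 := by simp at h; omega
      simp [roliStep, chunks3, List.intercalate, hi, roliGroup,
        PySem.List.enumerate_nil]
    · have ht1 : 1 ≤ t.length := by
        cases t with | nil => exact absurd rfl ht | cons x xs => simp
      have hi : ¬ (i + 1 + 1 = (len : Int) - 1) := by simp at h; omega
      have hne : (chunks3 t).map roliGroup ≠ [] := by simpa using chunks3_ne_nil t ht
      rw [chunks3, List.map_cons, intercalate_dash_cons_ne_nil _ _ hne]
      have e1 : roliStep len (0, 0, m) (i, a)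
          = (0, 1, m ++ roliC.getD (pyDigit a) []) := by simp [roliStep]
      have e2 : roliStep len (0, 1, m ++ roliC.getD (pyDigit a) []) (i + 1, b)
          = (0, 2, m ++ roliC.getD (pyDigit a) [] ++ roliV.getD (pyDigit b) []) := by
        simp [roliStep]
      have e3 : roliStep len
            (0, 2, m ++ roliC.getD (pyDigit a) [] ++ roliV.getD (pyDigit b) []) (i + 1 + 1, c)
          = (0, 0, m ++ roliC.getD (pyDigit a) [] ++ roliV.getD (pyDigit b) []
              ++ roliC.getD (pyDigit c) [] ++ ['-']) := by
        simp [roliStep, hi]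
      rw [e1, e2, e3]
      have einit : m ++ roliC.getD (pyDigit a) [] ++ roliV.getD (pyDigit b) []
            ++ roliC.getD (pyDigit c) [] ++ ['-'] = m ++ roliGroup [a, b, c] ++ ['-'] := by
        simp [roliGroup]
      rw [einit, ih hlen' (i + 1 + 1 + 1) (m ++ roliGroup [a, b, c] ++ ['-']) len
        (by simp at h ⊢; omega)]
      simp
  | case3 l h1 h2 =>
    intro i m len h
    exfalso
    cases l with
    | nil => exact h1 rfl
    | cons a l1 =>
      cases l1 with
      | nil => simp at hlen
      | cons b l2 =>
        cases l2 with
        | nil => simp at hlen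
        | cons c t => exact h2 a b c t rfl

theorem roli_core (s : List Char) :
    ((PySem.List.enumerate s 0).foldl (roliStep s.length) (s.length % 3, 0, [])).2.2
      = List.intercalate ['-']
          ((if s.length % 3 = 1 then [roliV.getD (pyDigit (s.getD 0 ' ')) []]
            else if s.length % 3 = 2 then
              [roliC.getD (pyDigit (s.getD 0 ' ')) [] ++ roliV.getD (pyDigit (s.getD 1 ' ')) []]
            else []) ++ (chunks3 (s.drop (s.length % 3))).map roliGroup) := by
  by_cases h0 : s.length % 3 = 0
  · -- r = 0 : the whole string is the 3-cycle phase
    rw [h0]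
    simp only [if_neg (by omega : ¬ (0 : Nat) = 1), if_neg (by omega : ¬ (0 : Nat) = 2),
      List.nil_append, List.drop_zero]
    rw [roli_tail_phase s h0 0 [] s.length (by simp)]
    simp
  by_cases h1 : s.length % 3 = 1
  · -- r = 1 : a single leading vowel digit
    cases s with
    | nil => simp at h1
    | cons a t =>
      have ht3 : t.length % 3 = 0 := by simp at h1; omega
      rw [h1, PySem.List.enumerate_cons]
      simp only [List.foldl_cons, List.drop_succ_cons, List.drop_zero]
      by_cases ht : t = []
      · subst ht
        simp [roliStep, chunks3, List.intercalate, PySem.List.enumerate_nil]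
      · have ht1 : 1 ≤ t.length := by
          cases t with | nil => exact absurd rfl ht | cons x xs => simp
        have hi : ¬ ((0 : Int) = ((a :: t).length : Int) - 1) := by simp; omega
        have e1 : roliStep (a :: t).length (1, 0, []) (0, a)
            = (0, 0, roliV.getD (pyDigit a) [] ++ ['-']) := by
          simp [roliStep]; omega
        rw [e1, roli_tail_phase t ht3 (0 + 1) (roliV.getD (pyDigit a) [] ++ ['-'])
          (a :: t).length (by simp; omega)]
        have hne : (chunks3 t).map roliGroup ≠ [] := by simpa using chunks3_ne_nil t ht
        norm_num
        rw [intercalate_dash_cons_ne_nil _ _ hne]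
        simp
  · -- r = 2 : a leading consonant-vowel pair
    have h2 : s.length % 3 = 2 := by omega
    cases s with
    | nil => simp at h2
    | cons a t0 =>
      cases t0 with
      | nil => simp at h2
      | cons b t =>
        have ht3 : t.length % 3 = 0 := by simp at h2; omega
        rw [h2, PySem.List.enumerate_cons, PySem.List.enumerate_cons]
        simp only [List.foldl_cons, List.drop_succ_cons, List.drop_zero]
        have e1 : roliStep (a :: b :: t).length (2, 0, []) (0, a)
            = (2, 1, roliC.getD (pyDigit a) []) := by simp [roliStep]
        by_cases ht : t = []
        · subst ht
          simp [roliStep, chunks3, List.intercalate, PySem.List.enumerate_nil]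
        · have ht1 : 1 ≤ t.length := by
            cases t with | nil => exact absurd rfl ht | cons x xs => simp
          have hi : ¬ ((0 : Int) + 1 = ((a :: b :: t).length : Int) - 1) := by simp; omega
          have e2 : roliStep (a :: b :: t).length (2, 1, roliC.getD (pyDigit a) []) (0 + 1, b)
              = (0, 0, roliC.getD (pyDigit a) [] ++ roliV.getD (pyDigit b) [] ++ ['-']) := by
            simp [roliStep]; omega
          rw [e1, e2, roli_tail_phase t ht3 (0 + 1 + 1)
            (roliC.getD (pyDigit a) [] ++ roliV.getD (pyDigit b) [] ++ ['-'])
            (a :: b :: t).length (by simp; omega)]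
          have hne : (chunks3 t).map roliGroup ≠ [] := by simpa using chunks3_ne_nil t ht
          norm_num
          rw [intercalate_dash_cons_ne_nil _ _ hne]
          simp

-- ===== VERDICT (by name: the statement is the Claim_ definition above) =====
theorem roli_spec : Claim_equal_roli := by
  intro n _ _
  unfold Spec_roli
  simp only [roli, roli_alt]
  exact congrArg String.ofList (roli_core (PySem.Int.toChars n))
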